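-- pv_equiv track=rewrite | github.com/kazuhiko1979/edabit_3 | 027_very_hard_Quad_Sequence.py | quad_sequence
-- ===== SOURCE A (Python) =====
-- def quad_sequence(lst):
--
--   if len(lst) < 3:
--     return []
--
--   if not all(isinstance(x, (int, float)) for x in lst):
--     return []
--
--   result = []
--   target_length = len(lst)
--
--   while len(result) < target_length:
--
--     first_difference = [lst[i+1] - lst[i] for i in range(len(lst) - 1)]
--
--     second_difference = [first_difference[j+1] - first_difference[j] for j in range(len(first_difference) - 1)]
--
--     constant_diff = second_difference[0]
--     next_first_diff = first_difference[-1] + constant_diff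
--
--     next_term = lst[-1] + next_first_diff
--     result.append(next_term)
--
--     lst.append(next_term)
--
--   return result
-- ===== SOURCE B (Python) =====
-- def quad_sequence(lst):
--     # One pass: the quadratic's second difference is constant and A always reads
--     # it from the (unchanged) first three elements, so precompute it once and
--     # extend by maintaining a running first difference.
--     # Unlike A, this does NOT mutate lst (A appends the new terms to lst in place).
--     n = len(lst)
--     if n < 3:
--         return []
--     d2 = (lst[2] - lst[1]) - (lst[1] - lst[0])
--     fd = lst[-1] - lst[-2]
--     last = lst[-1]
--     out = []
--     for _ in range(n):
--         fd += d2
--         last += fd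
--         out.append(last)
--     return out
-- ===== Notes on version B (the rewrite author's own statement) =====
-- stated objective: faster
-- what changed: Instead of recomputing the whole first- and second-difference lists from the growing list on every iteration, B reads the constant second difference once from the first three elements and extends in one pass with a running first difference; B does not mutate lst (return value is identical).
import Mathlib
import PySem

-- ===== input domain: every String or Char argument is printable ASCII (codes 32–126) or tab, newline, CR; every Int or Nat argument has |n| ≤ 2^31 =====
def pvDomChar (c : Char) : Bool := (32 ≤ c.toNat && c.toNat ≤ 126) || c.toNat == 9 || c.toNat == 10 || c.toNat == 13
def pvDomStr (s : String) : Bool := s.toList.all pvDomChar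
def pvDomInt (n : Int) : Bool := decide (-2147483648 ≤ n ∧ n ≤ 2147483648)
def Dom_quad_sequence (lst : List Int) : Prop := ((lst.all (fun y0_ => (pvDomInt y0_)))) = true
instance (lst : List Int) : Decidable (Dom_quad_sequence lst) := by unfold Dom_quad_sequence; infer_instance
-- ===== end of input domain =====

-- B replaces A's per-step recomputation of both difference lists with a single pass
-- keeping a running first difference (O(n) vs O(n^2)); equality is about the return
-- value only: Python A appends the produced terms to lst in place, B does not mutate lst.


-- ===== PORT A =====
-- first/second difference comprehension: [xs[i+1] - xs[i] for i in range(len(xs) - 1)]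
def qsDiff (xs : List Int) : List Int :=
  (PySem.List.pyRange 0 ((xs.length : Int) - 1) 1).map
    (fun i => PySem.List.pyGetD xs (i + 1) 0 - PySem.List.pyGetD xs i 0)

-- the while loop; in Python it runs exactly `target_length` times (result grows by one each pass)
def qsLoopA : Nat → List Int → List Int → List Int
  | 0, _, result => result
  | k + 1, lst, result =>
    let first_difference := qsDiff lst
    let second_difference := qsDiff first_difference
    let constant_diff := PySem.List.pyGetD second_difference 0 0
    let next_first_diff := PySem.List.pyGetD first_difference (-1) 0 + constant_diff
    let next_term := PySem.List.pyGetD lst (-1) 0 + next_first_diff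
    qsLoopA k (lst ++ [next_term]) (result ++ [next_term])

def quad_sequence (lst : List Int) : List Int :=
  if lst.length < 3 then []
  -- the `all isinstance(int|float)` guard is always true for List Int
  else qsLoopA lst.length lst []

-- ===== PORT B =====
def qsLoopB : Nat → Int → Int → Int → List Int
  | 0, _, _, _ => []
  | n + 1, fd, last, d2 =>
    let fd' := fd + d2
    let last' := last + fd'
    last' :: qsLoopB n fd' last' d2

def quad_sequence_alt (lst : List Int) : List Int :=
  let n := lst.length
  if n < 3 then []
  else
    let d2 := (PySem.List.pyGetD lst 2 0 - PySem.List.pyGetD lst 1 0)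
              - (PySem.List.pyGetD lst 1 0 - PySem.List.pyGetD lst 0 0)
    let fd := PySem.List.pyGetD lst (-1) 0 - PySem.List.pyGetD lst (-2) 0
    let last := PySem.List.pyGetD lst (-1) 0
    qsLoopB n fd last d2

-- ===== PRECONDITION & SPEC =====
def Spec_quad_sequence (lst : List Int) (out : List Int) : Prop := out = quad_sequence_alt lst
instance (lst : List Int) (out : List Int) : Decidable (Spec_quad_sequence lst out) := by unfold Spec_quad_sequence; infer_instance

-- ===== CLAIM (what is proved, stated in full; the proofs are below) =====
def Claim_equal_quad_sequence : Prop := ∀ (lst : List Int), Dom_quad_sequence lst → Spec_quad_sequence lst (quad_sequence lst)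

-- ===== LEMMAS AND PROOFS =====

lemma qsDiff_length (xs : List Int) : (qsDiff xs).length = xs.length - 1 := by
  simp [qsDiff, PySem.List.length_pyRange_one]

lemma qsDiff_getD (xs : List Int) (i : Nat) (h : i + 1 < xs.length) :
    PySem.List.pyGetD (qsDiff xs) (i : Int) 0 = xs.getD (i + 1) 0 - xs.getD i 0 := by
  unfold qsDiff
  rw [PySem.List.pyGetD_map_pyRange_of_nonneg _ _ _ _ (by positivity) (by omega)]
  have : ((i : Int) + 1) = ((i + 1 : Nat) : Int) := by push_cast; ring
  rw [this, PySem.List.pyGetD_natCast, PySem.List.pyGetD_natCast]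

lemma pyGetD_neg_one_getD (xs : List Int) (h : xs ≠ []) :
    PySem.List.pyGetD xs (-1) 0 = xs.getD (xs.length - 1) 0 := by
  rw [show ((-1 : Int)) = -((1 : Nat) : Int) by norm_num,
    PySem.List.pyGetD_neg_natCast xs 1 0 (by omega) (by cases xs <;> simp_all)]
  rw [List.getD_eq_getElem _ _ (by cases xs <;> simp_all)]

lemma loopA_eq (k : Nat) : ∀ (lst result : List Int), 3 ≤ lst.length →
    qsLoopA k lst result
      = result ++ qsLoopB k
          (lst.getD (lst.length - 1) 0 - lst.getD (lst.length - 2) 0)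
          (lst.getD (lst.length - 1) 0)
          (lst.getD 2 0 - 2 * lst.getD 1 0 + lst.getD 0 0) := by
  induction k with
  | zero => intro lst result _; simp [qsLoopA, qsLoopB]
  | succ k ih =>
    intro lst result h
    have hne : lst ≠ [] := by cases lst <;> simp_all
    have hfdlen : (qsDiff lst).length = lst.length - 1 := qsDiff_length lst
    have hfdne : qsDiff lst ≠ [] := by
      intro hc; rw [hc] at hfdlen; simp at hfdlen; omega
    -- the (constant) second difference A reads each pass from the first three elements
    have hq0 := qsDiff_getD (qsDiff lst) 0 (by omega)
    have hq1 := qsDiff_getD lst 1 (by omega)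
    have hq0' := qsDiff_getD lst 0 (by omega)
    norm_num [← List.getD_eq_getElem?_getD] at hq0 hq1 hq0'
    have g1 : (qsDiff lst).getD 1 0 = lst.getD 2 0 - lst.getD 1 0 :=
      (PySem.List.pyGetD_ofNat' (qsDiff lst) 1 0).symm.trans hq1
    have g0 : (qsDiff lst).getD 0 0 = lst.getD 1 0 - lst.getD 0 0 :=
      (PySem.List.pyGetD_zero (qsDiff lst) 0).symm.trans hq0'
    have hcd : PySem.List.pyGetD (qsDiff (qsDiff lst)) 0 0
        = lst.getD 2 0 - 2 * lst.getD 1 0 + lst.getD 0 0 := by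
      rw [hq0, g1, g0]; ring
    -- the last first difference
    have hfd2 := qsDiff_getD lst (lst.length - 2) (by omega)
    rw [PySem.List.pyGetD_natCast] at hfd2
    have hlastfd : PySem.List.pyGetD (qsDiff lst) (-1) 0
        = lst.getD (lst.length - 1) 0 - lst.getD (lst.length - 2) 0 := by
      rw [pyGetD_neg_one_getD _ hfdne, hfdlen,
        show lst.length - 1 - 1 = lst.length - 2 from by omega, hfd2,
        show lst.length - 2 + 1 = lst.length - 1 from by omega]
    have hlast : PySem.List.pyGetD lst (-1) 0 = lst.getD (lst.length - 1) 0 :=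
      pyGetD_neg_one_getD lst hne
    set fd := lst.getD (lst.length - 1) 0 - lst.getD (lst.length - 2) 0 with hfd
    set d2 := lst.getD 2 0 - 2 * lst.getD 1 0 + lst.getD 0 0 with hd2
    set t := lst.getD (lst.length - 1) 0 + (fd + d2) with ht
    show qsLoopA (k + 1) lst result = result ++ qsLoopB (k + 1) fd (lst.getD (lst.length - 1) 0) d2
    rw [qsLoopA]
    simp only [hcd, hlastfd, hlast]
    rw [ih (lst ++ [t]) (result ++ [t]) (by simp; omega)]
    have hlen : (lst ++ [t]).length = lst.length + 1 := by simp
    have hgetlt : ∀ i : Nat, i < lst.length → (lst ++ [t]).getD i 0 = lst.getD i 0 := by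
      intro i hi
      rw [List.getD_eq_getElem _ _ (by simp; omega), List.getD_eq_getElem _ _ hi,
        List.getElem_append_left hi]
    have hgetlast : (lst ++ [t]).getD ((lst ++ [t]).length - 1) 0 = t := by
      rw [hlen, List.getD_eq_getElem _ _ (by simp)]
      simp
    have hgetprev : (lst ++ [t]).getD ((lst ++ [t]).length - 2) 0 = lst.getD (lst.length - 1) 0 := by
      rw [hlen, show lst.length + 1 - 2 = lst.length - 1 by omega, hgetlt _ (by omega)]
    rw [hgetlast, hgetprev, hgetlt 2 (by omega), hgetlt 1 (by omega), hgetlt 0 (by omega)]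
    rw [qsLoopB]
    simp only [← hd2]
    have htfd : t - lst.getD (lst.length - 1) 0 = fd + d2 := by rw [ht]; ring
    rw [htfd, List.append_assoc]
    rfl

-- ===== VERDICT (by name: the statement is the Claim_ definition above) =====
theorem quad_sequence_spec : Claim_equal_quad_sequence := by
  intro lst _
  show quad_sequence lst = quad_sequence_alt lst
  unfold quad_sequence quad_sequence_alt
  by_cases h : lst.length < 3
  · simp [h]
  · simp only [h, if_false]
    have h3 : 3 ≤ lst.length := by omega
    have hne : lst ≠ [] := by cases lst <;> simp_all
    rw [loopA_eq lst.length lst [] h3, List.nil_append]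
    have hm1 : PySem.List.pyGetD lst (-1) 0 = lst.getD (lst.length - 1) 0 :=
      pyGetD_neg_one_getD lst hne
    have hm2 : PySem.List.pyGetD lst (-2) 0 = lst.getD (lst.length - 2) 0 := by
      rw [show ((-2 : Int)) = -((2 : Nat) : Int) by norm_num,
        PySem.List.pyGetD_neg_natCast lst 2 0 (by omega) (by omega),
        List.getD_eq_getElem _ _ (by omega)]
    rw [hm1, hm2, PySem.List.pyGetD_ofNat' lst 2 0, PySem.List.pyGetD_ofNat' lst 1 0,
      PySem.List.pyGetD_zero lst 0]
    congr 1
    ring
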